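-- pv_equiv track=rewrite | github.com/mouradbz/PCD | app.py | diff2
-- ===== SOURCE A (Python) =====
-- def diff2(str1,str2) :
--     n1 = len(str1)
--     n2 = len(str2)
--     i = 0
--     while (i < n1) and (i < n2):
--         if(str1[n1-i-1] == str2[n2-1-i]):
--             i += 1
--         else :
--             break
--     return i
-- ===== SOURCE B (Python) =====
-- def diff2(str1, str2):
--     lo, hi = 0, min(len(str1), len(str2))
--     while lo < hi:
--         mid = (lo + hi + 1) // 2
--         if str1[len(str1) - mid:] == str2[len(str2) - mid:]:
--             lo = mid
--         else:
--             hi = mid - 1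
--     return lo
-- ===== Notes on version B (the rewrite author's own statement) =====
-- stated objective: alternative
-- what changed: Replaces A's character-by-character end-scan with a binary search over the common-suffix length, exploiting monotonicity of suffix equality and comparing whole slices.
import Mathlib
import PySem

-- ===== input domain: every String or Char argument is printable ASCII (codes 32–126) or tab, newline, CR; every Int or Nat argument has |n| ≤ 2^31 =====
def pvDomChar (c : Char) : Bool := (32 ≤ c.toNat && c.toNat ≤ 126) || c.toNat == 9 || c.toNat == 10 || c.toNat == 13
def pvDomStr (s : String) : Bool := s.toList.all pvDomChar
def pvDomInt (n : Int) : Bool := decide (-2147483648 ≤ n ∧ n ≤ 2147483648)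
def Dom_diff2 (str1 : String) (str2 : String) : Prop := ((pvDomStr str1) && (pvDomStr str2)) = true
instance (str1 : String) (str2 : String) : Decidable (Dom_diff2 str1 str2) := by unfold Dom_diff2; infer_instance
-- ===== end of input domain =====

-- B replaces A's character-by-character end scan with a binary search on the
-- common-suffix length (monotone slice-equality test); alternative algorithm, no speed claim.

-- ===== PORT A =====
-- the while loop of A: state is the counter i; indexes str1[n1-i-1], str2[n2-1-i]
def diff2Loop (s1 s2 : List Char) (n1 n2 i : Nat) : Nat :=
  if _h : i < n1 ∧ i < n2 then
    if PySem.List.pyGet? s1 ((n1 : Int) - i - 1) == PySem.List.pyGet? s2 ((n2 : Int) - 1 - i) then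
      diff2Loop s1 s2 n1 n2 (i + 1)
    else i
  else i
termination_by n1 - i
decreasing_by omega

def diff2 (str1 : String) (str2 : String) : Int :=
  ((diff2Loop str1.toList str2.toList str1.toList.length str2.toList.length 0 : Nat) : Int)

-- ===== PORT B =====
-- the while loop of B: binary search on lo..hi; str[len-mid:] is a nonnegative-start slice
def bsLoop (s1 s2 : List Char) (lo hi : Nat) : Nat :=
  if lo < hi then
    let mid := (lo + hi + 1) / 2
    if PySem.List.slice s1 (some ((s1.length - mid : Nat) : Int)) none
        == PySem.List.slice s2 (some ((s2.length - mid : Nat) : Int)) none then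
      bsLoop s1 s2 mid hi
    else
      bsLoop s1 s2 lo (mid - 1)
  else lo
termination_by hi - lo
decreasing_by all_goals omega

def diff2_alt (str1 : String) (str2 : String) : Int :=
  ((bsLoop str1.toList str2.toList 0 (min str1.toList.length str2.toList.length) : Nat) : Int)

-- ===== PRECONDITION & SPEC =====
def Spec_diff2 (str1 : String) (str2 : String) (out : Int) : Prop := out = diff2_alt str1 str2
instance (str1 : String) (str2 : String) (out : Int) : Decidable (Spec_diff2 str1 str2 out) := by unfold Spec_diff2; infer_instance

-- ===== CLAIM (what is proved, stated in full; the proofs are below) =====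
def Claim_equal_diff2 : Prop := ∀ (str1 : String) (str2 : String), Dom_diff2 str1 str2 → Spec_diff2 str1 str2 (diff2 str1 str2)

-- ===== LEMMAS AND PROOFS =====

-- length of the common prefix of two lists (both ports reduce to this on the reversed strings)
def cpl : List Char → List Char → Nat
  | a :: as, b :: bs => if a = b then cpl as bs + 1 else 0
  | _, _ => 0

theorem cpl_le_left : ∀ (l1 l2 : List Char), cpl l1 l2 ≤ l1.length := by
  intro l1
  induction l1 with
  | nil => intro l2; cases l2 <;> simp [cpl]
  | cons a as ih =>
      intro l2
      cases l2 with
      | nil => simp [cpl]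
      | cons b bs =>
          simp only [cpl]
          split
          · have := ih bs; simp; omega
          · simp

theorem cpl_le_right : ∀ (l1 l2 : List Char), cpl l1 l2 ≤ l2.length := by
  intro l1
  induction l1 with
  | nil => intro l2; cases l2 <;> simp [cpl]
  | cons a as ih =>
      intro l2
      cases l2 with
      | nil => simp [cpl]
      | cons b bs =>
          simp only [cpl]
          split
          · have := ih bs; simp; omega
          · simp

theorem take_eq_iff_le_cpl : ∀ (k : Nat) (l1 l2 : List Char),
    k ≤ l1.length → k ≤ l2.length → (l1.take k = l2.take k ↔ k ≤ cpl l1 l2) := by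
  intro k
  induction k with
  | zero => intro l1 l2 _ _; simp
  | succ k ih =>
      intro l1 l2 h1 h2
      cases l1 with
      | nil => simp at h1
      | cons a as =>
          cases l2 with
          | nil => simp at h2
          | cons b bs =>
              simp only [List.take_succ_cons, cpl]
              constructor
              · intro h
                have hab : a = b := by injection h
                have ht : as.take k = bs.take k := by injection h
                rw [if_pos hab]
                have := (ih as bs (by simpa using h1) (by simpa using h2)).mp ht
                omega
              · intro h
                by_cases hab : a = b
                · rw [if_pos hab] at h
                  have := (ih as bs (by simpa using h1) (by simpa using h2)).mpr (by omega)
                  simp [hab, this]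
                · rw [if_neg hab] at h; omega

theorem cpl_nil_right : ∀ (l : List Char), cpl l [] = 0 := by
  intro l; cases l <;> simp [cpl]

-- A's loop computes i plus the common prefix length of the remaining reversed tails
theorem diff2Loop_eq : ∀ (s1 s2 : List Char) (i : Nat),
    diff2Loop s1 s2 s1.length s2.length i = i + cpl (s1.reverse.drop i) (s2.reverse.drop i) := by
  intro s1 s2 i
  fun_induction diff2Loop s1 s2 s1.length s2.length i with
  | case1 i h heq ih =>
      obtain ⟨h1, h2⟩ := h
      rw [ih]
      have e1 : ((s1.length : Int) - i - 1) = ((s1.length - 1 - i : Nat) : Int) := by omega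
      have e2 : ((s2.length : Int) - 1 - i) = ((s2.length - 1 - i : Nat) : Int) := by omega
      rw [e1, e2, PySem.List.pyGet?_natCast, PySem.List.pyGet?_natCast] at heq
      have g1 : s1[s1.length - 1 - i]? = s1.reverse[i]? := by
        rw [List.getElem?_reverse h1]
      have g2 : s2[s2.length - 1 - i]? = s2.reverse[i]? := by
        rw [List.getElem?_reverse h2]
      rw [g1, g2] at heq
      have hi1 : i < s1.reverse.length := by simpa using h1
      have hi2 : i < s2.reverse.length := by simpa using h2
      rw [List.drop_eq_getElem_cons hi1, List.drop_eq_getElem_cons hi2]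
      have hch : s1.reverse[i] = s2.reverse[i] := by
        rw [List.getElem?_eq_getElem hi1, List.getElem?_eq_getElem hi2] at heq
        simpa using heq
      simp only [cpl]
      rw [if_pos hch]
      omega
  | case2 i h heq =>
      obtain ⟨h1, h2⟩ := h
      have e1 : ((s1.length : Int) - i - 1) = ((s1.length - 1 - i : Nat) : Int) := by omega
      have e2 : ((s2.length : Int) - 1 - i) = ((s2.length - 1 - i : Nat) : Int) := by omega
      rw [e1, e2, PySem.List.pyGet?_natCast, PySem.List.pyGet?_natCast] at heq
      have g1 : s1[s1.length - 1 - i]? = s1.reverse[i]? := by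
        rw [List.getElem?_reverse h1]
      have g2 : s2[s2.length - 1 - i]? = s2.reverse[i]? := by
        rw [List.getElem?_reverse h2]
      rw [g1, g2] at heq
      have hi1 : i < s1.reverse.length := by simpa using h1
      have hi2 : i < s2.reverse.length := by simpa using h2
      rw [List.drop_eq_getElem_cons hi1, List.drop_eq_getElem_cons hi2]
      have hch : s1.reverse[i] ≠ s2.reverse[i] := by
        rw [List.getElem?_eq_getElem hi1, List.getElem?_eq_getElem hi2] at heq
        simpa using heq
      simp only [cpl]
      rw [if_neg hch]
      omega
  | case3 i h =>
      have : i ≥ s1.length ∨ i ≥ s2.length := by omega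
      rcases this with h' | h'
      · rw [List.drop_eq_nil_of_le (by simpa using h')]
        simp [cpl]
      · rw [List.drop_eq_nil_of_le (as := s2.reverse) (by simpa using h')]
        rw [cpl_nil_right]
        omega

-- tail-slice equality is take-equality on the reversed lists
theorem drop_eq_iff_take_reverse (l1 l2 : List Char) (k : Nat)
    (h1 : k ≤ l1.length) (h2 : k ≤ l2.length) :
    (l1.drop (l1.length - k) = l2.drop (l2.length - k)) ↔
      (l1.reverse.take k = l2.reverse.take k) := by
  constructor
  · intro h
    have := congrArg List.reverse h
    rw [List.reverse_drop, List.reverse_drop] at this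
    have e1 : l1.length - (l1.length - k) = k := by omega
    have e2 : l2.length - (l2.length - k) = k := by omega
    rwa [e1, e2] at this
  · intro h
    have := congrArg List.reverse h
    rw [List.reverse_take, List.reverse_take] at this
    simp only [List.reverse_reverse, List.length_reverse] at this
    exact this

-- B's binary search homes in on cpl of the reversed lists
theorem bsLoop_eq (s1 s2 : List Char) :
    ∀ (n lo hi : Nat), hi - lo ≤ n →
      lo ≤ cpl s1.reverse s2.reverse → cpl s1.reverse s2.reverse ≤ hi →
      hi ≤ min s1.length s2.length →
      bsLoop s1 s2 lo hi = cpl s1.reverse s2.reverse := by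
  intro n
  induction n with
  | zero =>
      intro lo hi hfuel hlo hhi _
      rw [bsLoop]
      rw [if_neg (by omega)]
      omega
  | succ n ih =>
      intro lo hi hfuel hlo hhi hm
      by_cases hlt : lo < hi
      · rw [bsLoop, if_pos hlt]
        show (if (PySem.List.slice s1 (some ((s1.length - (lo + hi + 1) / 2 : Nat) : Int)) none
            == PySem.List.slice s2 (some ((s2.length - (lo + hi + 1) / 2 : Nat) : Int)) none) = true then
            bsLoop s1 s2 ((lo + hi + 1) / 2) hi
          else bsLoop s1 s2 lo ((lo + hi + 1) / 2 - 1)) = cpl s1.reverse s2.reverse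
        generalize hmid : (lo + hi + 1) / 2 = mid
        have hc : cpl s1.reverse s2.reverse ≤ min s1.length s2.length := by
          have h1 := cpl_le_left s1.reverse s2.reverse
          have h2 := cpl_le_right s1.reverse s2.reverse
          rw [List.length_reverse] at h1 h2
          omega
        set c := cpl s1.reverse s2.reverse with hcdef
        have hmlo : lo < mid := by omega
        have hmhi : mid ≤ hi := by omega
        have hk1 : mid ≤ s1.length := by omega
        have hk2 : mid ≤ s2.length := by omega
        have htest : (PySem.List.slice s1 (some ((s1.length - mid : Nat) : Int)) none
            == PySem.List.slice s2 (some ((s2.length - mid : Nat) : Int)) none) =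
            decide (mid ≤ c) := by
          rw [PySem.List.slice_from_natCast, PySem.List.slice_from_natCast]
          rcases Nat.decLe mid c with hle | hle
          · -- ¬ mid ≤ c
            have : ¬ (s1.drop (s1.length - mid) = s2.drop (s2.length - mid)) := by
              intro h
              exact hle (((take_eq_iff_le_cpl mid s1.reverse s2.reverse
                (by simpa using hk1) (by simpa using hk2)).mp
                ((drop_eq_iff_take_reverse s1 s2 mid hk1 hk2).mp h)))
            simp [this, hle]
          · have : s1.drop (s1.length - mid) = s2.drop (s2.length - mid) := by
              exact (drop_eq_iff_take_reverse s1 s2 mid hk1 hk2).mpr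
                ((take_eq_iff_le_cpl mid s1.reverse s2.reverse
                  (by simpa using hk1) (by simpa using hk2)).mpr hle)
            simp [this, hle]
        rw [htest]
        by_cases hmc : mid ≤ c
        · rw [if_pos (by simp [hmc])]
          exact ih mid hi (by omega) hmc hhi hm
        · rw [if_neg (by simp [hmc])]
          exact ih lo (mid - 1) (by omega) hlo (by omega) (by omega)
      · rw [bsLoop, if_neg hlt]
        omega

-- ===== VERDICT (by name: the statement is the Claim_ definition above) =====
theorem diff2_spec : Claim_equal_diff2 := by
  intro str1 str2 _
  unfold Spec_diff2 diff2 diff2_alt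
  have hA := diff2Loop_eq str1.toList str2.toList 0
  simp only [List.drop_zero] at hA
  have hB := bsLoop_eq str1.toList str2.toList
      (min str1.toList.length str2.toList.length) 0
      (min str1.toList.length str2.toList.length) (by omega) (by omega)
      (by
        have h1 := cpl_le_left str1.toList.reverse str2.toList.reverse
        have h2 := cpl_le_right str1.toList.reverse str2.toList.reverse
        rw [List.length_reverse] at h1 h2
        omega)
      (by omega)
  rw [hA, hB]
  simp
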